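-- pv_equiv track=rewrite | github.com/bakunobu/exercise | 1400_basic_tasks/chap_6/6_83.py | is_descending
-- ===== SOURCE A (Python) =====
-- def is_descending(n:int) -> bool:
--     prev_num = n % 10
--     while n > 10:
--         n //= 10
--         num = n % 10
--         if num < prev_num:
--             return(False)
--         else:
--             prev_num = num
--     return(True)
-- ===== SOURCE B (Python) =====
-- def is_descending(n: int) -> bool:
--     s = str(n)
--     return all(a >= b for a, b in zip(s, s[1:]))
-- ===== Notes on version B (the rewrite author's own statement) =====
-- stated objective: idiomatic
-- what changed: Replaces the LSB-first digit-extraction loop (modulo and floor division) with one str(n) conversion and a single left-to-right all() over adjacent character pairs.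
-- outside the precondition, e.g. on is_descending(-12): A returns True, B returns False
import Mathlib
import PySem

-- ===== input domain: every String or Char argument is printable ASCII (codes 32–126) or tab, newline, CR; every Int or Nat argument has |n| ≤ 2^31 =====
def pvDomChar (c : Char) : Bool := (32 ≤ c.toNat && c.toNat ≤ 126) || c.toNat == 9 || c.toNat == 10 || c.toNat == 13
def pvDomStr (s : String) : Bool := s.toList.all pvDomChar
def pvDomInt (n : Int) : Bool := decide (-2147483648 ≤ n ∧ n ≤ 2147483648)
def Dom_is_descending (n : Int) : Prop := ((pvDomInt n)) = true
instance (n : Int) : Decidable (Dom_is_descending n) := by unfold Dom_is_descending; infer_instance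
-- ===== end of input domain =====

-- B: one str(n) conversion and a single left-to-right pass over adjacent character pairs,
-- instead of A's LSB-first digit extraction by % 10 and //= 10 (idiomatic; same cost).

-- ===== PORT A =====
-- the while loop, state (n, prev_num)
def pvLoopA (n prev : Int) : Bool :=
  if _h : 10 < n then
    let n' := PySem.Int.floordiv n 10
    let num := PySem.Int.mod n' 10
    if num < prev then false
    else pvLoopA n' num
  else true
termination_by n.toNat
decreasing_by
  have h2 : PySem.Int.floordiv n 10 < n :=
    (PySem.Int.floordiv_lt_iff_lt_mul (by norm_num)).mpr (by omega)
  omega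

def is_descending (n : Int) : Bool := pvLoopA n (PySem.Int.mod n 10)

-- ===== PORT B =====
-- s = str(n) as its character list (PySem.Int.toChars = (str(n)).toList, lemma toList_toStr);
-- zip(s, s[1:]) is s.zip (s.drop 1): s[1:] with the nonnegative in-range start 1 is exactly drop 1;
-- Python's 'a >= b' on single characters is code-point order = Lean's Char ≤.
def is_descending_alt (n : Int) : Bool :=
  let s := PySem.Int.toChars n
  (s.zip (s.drop 1)).all (fun p => p.2 ≤ p.1)

-- ===== PRECONDITION & SPEC =====
-- Pre_ excludes negative n, an unspecified corner where both results are accidents of the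
-- representations: A returns True because Python's nonnegative remainder and its while-guard
-- mean the loop never runs, while B returns False because the '-' sign character compares
-- below every digit; neither value is the specified digit order of a negative number.
def Pre_is_descending (n : Int) : Prop := 0 ≤ n
instance (n : Int) : Decidable (Pre_is_descending n) := by unfold Pre_is_descending; infer_instance
def pvWitness_is_descending : Int := (321)

def Spec_is_descending (n : Int) (out : Bool) : Prop := out = is_descending_alt n
instance (n : Int) (out : Bool) : Decidable (Spec_is_descending n out) := by unfold Spec_is_descending; infer_instance

-- ===== CLAIM (what is proved, stated in full; the proofs are below) =====
def Claim_equal_is_descending : Prop := ∀ (n : Int), Dom_is_descending n → Pre_is_descending n → Spec_is_descending n (is_descending n)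

-- ===== LEMMAS AND PROOFS =====

-- abbreviation for B's pass over a character list
def pvChk (s : List Char) : Bool := (s.zip (s.drop 1)).all (fun p => p.2 ≤ p.1)

theorem pvLoopA_le (n p : Int) (h : ¬ 10 < n) : pvLoopA n p = true := by
  rw [pvLoopA]; simp [h]

theorem pvChk_cons_cons (a b : Char) (l : List Char) :
    pvChk (a :: b :: l) = (decide (b ≤ a) && pvChk (b :: l)) := rfl

theorem pvChk_append_singleton (xs : List Char) (c l : Char)
    (h : xs.getLast? = some l) :
    pvChk (xs ++ [c]) = (pvChk xs && decide (c ≤ l)) := by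
  induction xs with
  | nil => simp at h
  | cons a t ih =>
    cases t with
    | nil =>
      simp only [List.getLast?_singleton, Option.some.injEq] at h
      subst h
      simp [pvChk, List.zip]
    | cons b t' =>
      have h' : (b :: t').getLast? = some l := by
        simpa [List.getLast?_cons_cons] using h
      have hrec := ih h'
      simp only [List.cons_append] at hrec ⊢
      rw [pvChk_cons_cons a b (t' ++ [c]), pvChk_cons_cons a b t', hrec, Bool.and_assoc]

-- Nat.toDigits facts --------------------------------------------------------

theorem pvCore_acc (fuel : Nat) : ∀ (n : Nat) (acc : List Char), n < fuel →
    Nat.toDigitsCore 10 fuel n acc = Nat.toDigitsCore 10 fuel n [] ++ acc := by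
  induction fuel with
  | zero => intro n acc h; omega
  | succ f ih =>
    intro n acc _h
    simp only [Nat.toDigitsCore]
    by_cases h0 : n / 10 = 0
    · simp [h0]
    · simp only [h0]
      have hlt : n / 10 < f := by
        have h1 : n / 10 < n := Nat.div_lt_self (by omega) (by omega)
        omega
      rw [ih (n / 10) (Nat.digitChar (n % 10) :: acc) hlt,
          ih (n / 10) [Nat.digitChar (n % 10)] hlt]
      simp

theorem pvCore_fuel (f1 : Nat) : ∀ (f2 n : Nat) (acc : List Char), n < f1 → n < f2 →
    Nat.toDigitsCore 10 f1 n acc = Nat.toDigitsCore 10 f2 n acc := by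
  induction f1 with
  | zero => intro f2 n acc h _; omega
  | succ f ih =>
    intro f2 n acc _h1 h2
    cases f2 with
    | zero => omega
    | succ g =>
      simp only [Nat.toDigitsCore]
      by_cases h0 : n / 10 = 0
      · simp [h0]
      · simp only [h0]
        have hlt : n / 10 < n := Nat.div_lt_self (by omega) (by omega)
        exact ih g (n / 10) _ (by omega) (by omega)

theorem pvToDigits_small (m : Nat) (h : m < 10) :
    Nat.toDigits 10 m = [Nat.digitChar m] := by
  simp [Nat.toDigits, Nat.toDigitsCore, Nat.div_eq_of_lt h, Nat.mod_eq_of_lt h]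

theorem pvToDigits_step (m : Nat) (h : 10 ≤ m) :
    Nat.toDigits 10 m = Nat.toDigits 10 (m / 10) ++ [Nat.digitChar (m % 10)] := by
  have h0 : ¬ m / 10 = 0 := by omega
  have hlt : m / 10 < m := Nat.div_lt_self (by omega) (by omega)
  calc Nat.toDigits 10 m = Nat.toDigitsCore 10 (m + 1) m [] := rfl
    _ = Nat.toDigitsCore 10 m (m / 10) [Nat.digitChar (m % 10)] := by
          conv_lhs => rw [Nat.toDigitsCore]
          simp [h0]
    _ = Nat.toDigitsCore 10 m (m / 10) [] ++ [Nat.digitChar (m % 10)] :=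
          pvCore_acc m (m / 10) _ hlt
    _ = Nat.toDigitsCore 10 (m / 10 + 1) (m / 10) [] ++ [Nat.digitChar (m % 10)] := by
          rw [pvCore_fuel m (m / 10 + 1) (m / 10) [] hlt (by omega)]
    _ = Nat.toDigits 10 (m / 10) ++ [Nat.digitChar (m % 10)] := rfl

theorem pvToDigits_last (m : Nat) :
    (Nat.toDigits 10 m).getLast? = some (Nat.digitChar (m % 10)) := by
  by_cases h : m < 10
  · rw [pvToDigits_small m h, Nat.mod_eq_of_lt h]; rfl
  · rw [pvToDigits_step m (by omega)]
    simp

theorem pvDigitChar_le (a b : Nat) (ha : a < 10) (hb : b < 10) :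
    decide (Nat.digitChar a ≤ Nat.digitChar b) = decide (a ≤ b) := by
  interval_cases a <;> interval_cases b <;> decide

-- main induction: A's loop on a natural number equals B's pass over its digit string
theorem pvKey (m : Nat) :
    pvLoopA (m : Int) (PySem.Int.mod (m : Int) 10) = pvChk (Nat.toDigits 10 m) := by
  induction m using Nat.strong_induction_on with
  | _ m ih =>
    by_cases hm : m ≤ 10
    · interval_cases m <;>
        · rw [pvLoopA_le _ _ (by norm_num)]
          decide
    · have hdiv : PySem.Int.floordiv (m : Int) 10 = ((m / 10 : Nat) : Int) := by
        exact_mod_cast PySem.Int.floordiv_natCast m 10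
      have hmod : ∀ k : Nat, PySem.Int.mod (k : Int) 10 = ((k % 10 : Nat) : Int) := by
        intro k; exact_mod_cast PySem.Int.mod_natCast k 10
      have hgt : (10 : Int) < (m : Int) := by exact_mod_cast (by omega : 10 < m)
      rw [pvLoopA]
      simp only [hgt, dif_pos, hdiv, hmod]
      have hIH : pvLoopA ((m / 10 : Nat) : Int) (((m / 10 % 10 : Nat) : Int))
          = pvChk (Nat.toDigits 10 (m / 10)) := by
        have := ih (m / 10) (Nat.div_lt_self (by omega) (by omega))
        rwa [hmod (m / 10)] at this
      rw [pvToDigits_step m (by omega),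
          pvChk_append_singleton _ _ _ (pvToDigits_last (m / 10)),
          pvDigitChar_le (m % 10) (m / 10 % 10) (by omega) (by omega)]
      by_cases hcmp : m % 10 ≤ m / 10 % 10
      · have hc : ¬ ((m / 10 % 10 : Nat) : Int) < ((m % 10 : Nat) : Int) := by
          exact_mod_cast not_lt.mpr hcmp
        rw [if_neg hc, hIH]
        simp [hcmp]
      · have hc : ((m / 10 % 10 : Nat) : Int) < ((m % 10 : Nat) : Int) := by
          exact_mod_cast (by omega : m / 10 % 10 < m % 10)
        rw [if_pos hc]
        simp [hcmp]

theorem pvToChars_natCast (m : Nat) :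
    PySem.Int.toChars ((m : Nat) : Int) = Nat.toDigits 10 m := by
  simp [PySem.Int.toChars, Int.not_lt.mpr (Int.natCast_nonneg m)]

-- ===== VERDICT (by name: the statement is the Claim_ definition above) =====
theorem is_descending_spec : Claim_equal_is_descending := by
  intro n _hdom hpre
  have hp : (0 : Int) ≤ n := hpre
  obtain ⟨m, rfl⟩ : ∃ m : Nat, n = (m : Int) := ⟨n.toNat, by omega⟩
  show is_descending (m : Int) = is_descending_alt (m : Int)
  calc is_descending (m : Int)
      = pvChk (Nat.toDigits 10 m) := pvKey m
    _ = pvChk (PySem.Int.toChars (m : Int)) := by rw [pvToChars_natCast]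
    _ = is_descending_alt (m : Int) := rfl
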